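-- pv_equiv track=rewrite | github.com/aneeshKM/Hackerrank-Solutions | ProblemSolving-Algorithm/Python3/Punish alex.py | punish
-- ===== SOURCE A (Python) =====
-- def punish(nk):
--     n = nk[0]
--     k = nk[1]
--     x = n-1
--     p = 1
--     if n >= k:
--         return k
--     else:
--         while k-x>=n:
--             x += n-1
--             p += 1
--         s = k - x
--         if p%2 == 0:
--             return s
--         elif p%2 == 1:
--             return n-s+1
-- ===== SOURCE B (Python) =====
-- def punish(nk):
--     n = nk[0]
--     k = nk[1]
--     if n >= k:
--         return k
--     p = (k - n) // (n - 1) + 1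
--     s = k - p * (n - 1)
--     return s if p % 2 == 0 else n - s + 1
-- ===== Notes on version B (the rewrite author's own statement) =====
-- stated objective: alternative
-- what changed: replaces A's step-by-step while loop (one iteration per traversal of the row) with a closed-form computation of the pass count p via integer floor division
import Mathlib
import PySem

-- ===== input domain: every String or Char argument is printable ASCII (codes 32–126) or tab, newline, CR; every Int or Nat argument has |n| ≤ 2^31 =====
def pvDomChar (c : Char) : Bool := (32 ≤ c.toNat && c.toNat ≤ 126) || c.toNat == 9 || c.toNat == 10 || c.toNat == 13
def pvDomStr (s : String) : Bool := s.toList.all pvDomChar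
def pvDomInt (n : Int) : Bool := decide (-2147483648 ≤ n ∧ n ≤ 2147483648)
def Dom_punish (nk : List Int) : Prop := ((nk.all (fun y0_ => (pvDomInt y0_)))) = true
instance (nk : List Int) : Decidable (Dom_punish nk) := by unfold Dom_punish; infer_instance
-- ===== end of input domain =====

-- B replaces A's iterated while loop with a closed-form floor-division computation of the pass count (alternative algorithm).


-- ===== PORT A =====
-- A's while loop, with a fuel bound that only makes the recursion total; under Pre_
-- (n ≥ 2 when the loop runs) the fuel k.toNat is never exhausted.
def punishLoop (n k : Int) (x p : Int) : Nat → Int × Int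
  | 0 => (x, p)
  | Nat.succ f => if n ≤ k - x then punishLoop n k (x + (n - 1)) (p + 1) f else (x, p)

def punish (nk : List Int) : Int :=
  match PySem.List.pyGet? nk 0, PySem.List.pyGet? nk 1 with
  | some n, some k =>
    if k ≤ n then k
    else
      let xp := punishLoop n k (n - 1) 1 k.toNat
      let s := k - xp.1
      if PySem.Int.mod xp.2 2 = 0 then s else n - s + 1
  | _, _ => 0  -- IndexError in Python; excluded by Pre_punish

-- ===== PORT B =====
def punish_alt (nk : List Int) : Int :=
  match PySem.List.pyGet? nk 0 with
  | none => 0  -- IndexError in Python; excluded by Pre_punish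
  | some n =>
    match PySem.List.pyGet? nk 1 with
    | none => 0  -- IndexError in Python; excluded by Pre_punish
    | some k =>
      if k ≤ n then k
      else
        let p := PySem.Int.floordiv (k - n) (n - 1) + 1
        let s := k - p * (n - 1)
        if PySem.Int.mod p 2 = 0 then s else n - s + 1

-- ===== PRECONDITION & SPEC =====
-- Pre_ excludes lists of length < 2 (A raises IndexError) and inputs with n < k and n ≤ 1,
-- on which A's while loop never terminates (it diverges, returning nothing).
def Pre_punish (nk : List Int) : Prop :=
  2 ≤ nk.length ∧ (nk.getD 1 0 ≤ nk.getD 0 0 ∨ 2 ≤ nk.getD 0 0)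
instance (nk : List Int) : Decidable (Pre_punish nk) := by unfold Pre_punish; infer_instance
def pvWitness_punish : List Int := [4, 10]

def Spec_punish (nk : List Int) (out : Int) : Prop := out = punish_alt nk
instance (nk : List Int) (out : Int) : Decidable (Spec_punish nk out) := by unfold Spec_punish; infer_instance

-- ===== CLAIM (what is proved, stated in full; the proofs are below) =====
def Claim_equal_punish : Prop := ∀ (nk : List Int), Dom_punish nk → Pre_punish nk → Spec_punish nk (punish nk)

-- ===== LEMMAS AND PROOFS =====

-- The loop, started at x = p*(n-1) with enough fuel, ends at p = q := (k-n)/(n-1) + 1.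
lemma punishLoop_closed (n k : Int) (hn : 2 ≤ n) (q : Int)
    (hq1 : (q - 1) * (n - 1) ≤ k - n) (hq2 : k - n < q * (n - 1)) :
    ∀ (fuel : Nat) (p : Int), p ≤ q → (q - p).toNat ≤ fuel →
      punishLoop n k (p * (n - 1)) p fuel = (q * (n - 1), q) := by
  intro fuel
  induction fuel with
  | zero =>
    intro p hpq hf
    have : p = q := by omega
    subst this
    rfl
  | succ f ih =>
    intro p hpq hf
    by_cases hpe : p = q
    · subst hpe
      simp only [punishLoop]
      rw [if_neg (by omega)]
    · have hplt : p ≤ q - 1 := by omega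
      have hx : p * (n - 1) ≤ (q - 1) * (n - 1) :=
        mul_le_mul_of_nonneg_right hplt (by omega)
      simp only [punishLoop]
      rw [if_pos (by omega)]
      have : p * (n - 1) + (n - 1) = (p + 1) * (n - 1) := by ring
      rw [this]
      exact ih (p + 1) (by omega) (by omega)

theorem punish_spec_aux (nk : List Int) (h : Pre_punish nk) : punish nk = punish_alt nk := by
  obtain ⟨hlen, hnk⟩ := h
  match nk, hlen with
  | n :: k :: rest, _ =>
    simp only [List.getD, List.getElem?_cons_zero, List.getElem?_cons_succ, Option.getD_some] at hnk
    unfold punish punish_alt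
    rw [PySem.List.pyGet?_zero_cons,
        show PySem.List.pyGet? (n :: k :: rest) 1 = some k by
          simp [PySem.List.pyGet?, PySem.List.pyIdx?]]
    dsimp only
    by_cases hkn : k ≤ n
    · simp [hkn]
    · have hn : 2 ≤ n := by omega
      have hk : n < k := by omega
      rw [if_neg hkn, if_neg hkn]
      -- closed form q
      set e := (k - n) / (n - 1) with he
      have hd : (0:Int) < n - 1 := by omega
      have hmod := Int.mul_ediv_add_emod (k - n) (n - 1)
      rw [← he] at hmod
      have hmnn := Int.emod_nonneg (k - n) (by omega : (n:Int) - 1 ≠ 0)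
      have hmlt := Int.emod_lt_of_pos (k - n) hd
      have hq1 : ((e + 1) - 1) * (n - 1) ≤ k - n := by
        have : (e + 1 - 1) * (n - 1) = (n - 1) * e := by ring
        rw [this]; omega
      have hq2 : k - n < (e + 1) * (n - 1) := by
        have : (e + 1) * (n - 1) = (n - 1) * e + (n - 1) := by ring
        rw [this]; omega
      have hf : PySem.Int.floordiv (k - n) (n - 1) = e :=
        PySem.Int.floordiv_eq_ediv_of_pos hd
      have he0 : 0 ≤ e := Int.ediv_nonneg (by omega) (by omega)
      have hele : e ≤ k - n := Int.ediv_le_self _ (by omega)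
      have hloop : punishLoop n k (1 * (n - 1)) 1 k.toNat = ((e + 1) * (n - 1), e + 1) :=
        punishLoop_closed n k hn (e + 1) hq1 hq2 k.toNat 1 (by omega) (by omega)
      rw [one_mul] at hloop
      simp only [hloop, hf]

-- ===== VERDICT (by name: the statement is the Claim_ definition above) =====
theorem punish_spec : Claim_equal_punish := by
  intro nk _ hpre
  exact punish_spec_aux nk hpre
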